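-- pv_equiv track=rewrite | github.com/khollbach/advent | 2019/python/day8.py | read_image
-- ===== SOURCE A (Python) =====
-- from typing import List
--
-- Image = List[List[List[int]]]
--
-- def read_image(img_str: str, HEIGHT: int, WIDTH: int, DEPTH: int) -> Image:
--     assert DEPTH * HEIGHT * WIDTH == len(img_str)  # Divides evenly.
--     img = []
--     for i in range(DEPTH):
--         img.append([])  # layer i
--         for j in range(HEIGHT):
--             img[i].append([])  # row j
--             for k in range(WIDTH):
--                 digit = int(img_str[i*HEIGHT*WIDTH + j*WIDTH + k])
--                 img[i][j].append(digit)  # column k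
--     return img
-- ===== SOURCE B (Python) =====
-- def read_image(img_str, HEIGHT, WIDTH, DEPTH):
--     assert DEPTH * HEIGHT * WIDTH == len(img_str)  # Divides evenly.
--
--     def parse_row(s):
--         # Consume WIDTH digits from the front of the stream.
--         row = []
--         for _ in range(WIDTH):
--             row.append(int(s[0]))
--             s = s[1:]
--         return row, s
--
--     def parse_layer(s):
--         # Consume HEIGHT rows from the front of the stream.
--         layer = []
--         for _ in range(HEIGHT):
--             r, s = parse_row(s)
--             layer.append(r)
--         return layer, s
--
--     img = []
--     s = img_str
--     for _ in range(DEPTH):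
--         layer, s = parse_layer(s)
--         img.append(layer)
--     return img
-- ===== Notes on version B (the rewrite author's own statement) =====
-- stated objective: alternative
-- what changed: Replaces A's index arithmetic (recomputing a linear offset i*H*W+j*W+k per element) by a recursive-descent stream parser: helpers consume the string from the front, threading the unparsed remainder, so no element position is ever computed.
import Mathlib
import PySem

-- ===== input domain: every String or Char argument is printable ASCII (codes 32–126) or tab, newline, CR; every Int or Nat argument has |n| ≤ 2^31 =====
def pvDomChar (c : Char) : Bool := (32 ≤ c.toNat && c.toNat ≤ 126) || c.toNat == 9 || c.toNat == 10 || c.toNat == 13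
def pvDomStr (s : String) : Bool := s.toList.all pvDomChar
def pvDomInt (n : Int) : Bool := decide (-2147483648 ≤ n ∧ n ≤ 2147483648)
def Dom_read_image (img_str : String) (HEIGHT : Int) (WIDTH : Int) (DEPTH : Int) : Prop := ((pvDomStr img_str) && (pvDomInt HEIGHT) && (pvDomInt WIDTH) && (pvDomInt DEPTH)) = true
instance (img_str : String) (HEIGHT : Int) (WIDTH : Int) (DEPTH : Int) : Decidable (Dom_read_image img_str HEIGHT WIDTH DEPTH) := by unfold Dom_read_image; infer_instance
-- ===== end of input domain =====

-- B replaces A's per-element linear-offset index arithmetic by a recursive-descent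
-- stream parser that consumes the string from the front, threading the remainder
-- (objective: alternative decomposition, same cost).

-- ===== PORT A =====
-- int(img_str[idx]): pyGet? = img_str[idx] (none = IndexError), ofChars? = int(c) (none = ValueError);
-- both raise-cases are excluded by Pre_, so the .getD 0 default is never reached there.
def pvDigitAt (img_str : String) (idx : Int) : Int :=
  ((PySem.Str.pyGet? img_str idx).bind (fun c => PySem.Int.ofChars? [c])).getD 0

def read_image (img_str : String) (HEIGHT : Int) (WIDTH : Int) (DEPTH : Int) : List (List (List Int)) :=
  if DEPTH * HEIGHT * WIDTH = PySem.Str.len img_str then  -- assert (AssertionError excluded by Pre_)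
    (PySem.List.pyRange 0 DEPTH 1).foldl (fun img i =>
      img ++ [(PySem.List.pyRange 0 HEIGHT 1).foldl (fun layer j =>
        layer ++ [(PySem.List.pyRange 0 WIDTH 1).foldl (fun row k =>
          row ++ [pvDigitAt img_str (i * HEIGHT * WIDTH + j * WIDTH + k)]) []]) []]) []
  else []

-- ===== PORT B =====
-- parse_row: pops WIDTH chars off the front of the stream; int(s[0]) with
-- s[0] → head? (none = IndexError) and int(c) → ofChars? (none = ValueError),
-- both excluded by Pre_; s[1:] on List Char is .tail (Python-exact: '' on empty).
def pvParseRow (WIDTH : Int) (s : List Char) : List Int × List Char :=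
  (PySem.List.pyRange 0 WIDTH 1).foldl
    (fun (st : List Int × List Char) _ =>
      (st.1 ++ [((st.2.head?.bind (fun c => PySem.Int.ofChars? [c])).getD 0)], st.2.tail))
    ([], s)

-- parse_layer: consumes HEIGHT rows, threading the remainder.
def pvParseLayer (HEIGHT : Int) (WIDTH : Int) (s : List Char) : List (List Int) × List Char :=
  (PySem.List.pyRange 0 HEIGHT 1).foldl
    (fun (st : List (List Int) × List Char) _ =>
      let rs := pvParseRow WIDTH st.2
      (st.1 ++ [rs.1], rs.2))
    ([], s)

def read_image_alt (img_str : String) (HEIGHT : Int) (WIDTH : Int) (DEPTH : Int) : List (List (List Int)) :=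
  if DEPTH * HEIGHT * WIDTH = PySem.Str.len img_str then  -- assert
    ((PySem.List.pyRange 0 DEPTH 1).foldl
      (fun (st : List (List (List Int)) × List Char) _ =>
        let ls := pvParseLayer HEIGHT WIDTH st.2
        (st.1 ++ [ls.1], ls.2))
      ([], img_str.toList)).1
  else []

-- ===== PRECONDITION & SPEC =====
-- Pre_ excludes exactly the inputs where the Python A raises: the assert fails
-- (AssertionError), or some character of the string — all of which A reads when
-- DEPTH, HEIGHT, WIDTH are all positive — is not a digit (ValueError from int()).
def Pre_read_image (img_str : String) (HEIGHT : Int) (WIDTH : Int) (DEPTH : Int) : Prop :=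
  DEPTH * HEIGHT * WIDTH = PySem.Str.len img_str ∧
  (0 < DEPTH → 0 < HEIGHT → 0 < WIDTH →
    img_str.toList.all (fun c => (PySem.Int.ofChars? [c]).isSome) = true)
instance (img_str : String) (HEIGHT : Int) (WIDTH : Int) (DEPTH : Int) : Decidable (Pre_read_image img_str HEIGHT WIDTH DEPTH) := by unfold Pre_read_image; infer_instance

def pvWitness_read_image : String × Int × Int × Int := ("123456", 1, 3, 2)

def Spec_read_image (img_str : String) (HEIGHT : Int) (WIDTH : Int) (DEPTH : Int) (out : List (List (List Int))) : Prop := out = read_image_alt img_str HEIGHT WIDTH DEPTH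
instance (img_str : String) (HEIGHT : Int) (WIDTH : Int) (DEPTH : Int) (out : List (List (List Int))) : Decidable (Spec_read_image img_str HEIGHT WIDTH DEPTH out) := by unfold Spec_read_image; infer_instance

-- ===== CLAIM (what is proved, stated in full; the proofs are below) =====
def Claim_equal_read_image : Prop := ∀ (img_str : String) (HEIGHT : Int) (WIDTH : Int) (DEPTH : Int), Dom_read_image img_str HEIGHT WIDTH DEPTH → Pre_read_image img_str HEIGHT WIDTH DEPTH → Spec_read_image img_str HEIGHT WIDTH DEPTH (read_image img_str HEIGHT WIDTH DEPTH)

-- ===== LEMMAS AND PROOFS =====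

-- int(c) on a single char, as B's step computes it on a cons cell.
def pvDigitOf (c : Char) : Int := (PySem.Int.ofChars? [c]).getD 0

-- parse_row characterisation: consuming l.length chars from a long-enough stream
-- yields the parsed prefix and the dropped remainder.  (Induction on the range list;
-- the loop body ignores the loop variable, so only the length matters.)
theorem pvParseRow_fold (l : List Int) :
    ∀ (acc : List Int) (s : List Char), l.length ≤ s.length →
    l.foldl (fun (st : List Int × List Char) _ =>
        (st.1 ++ [((st.2.head?.bind (fun c => PySem.Int.ofChars? [c])).getD 0)], st.2.tail))
      (acc, s)
      = (acc ++ (s.take l.length).map pvDigitOf, s.drop l.length) := by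
  induction l with
  | nil => intro acc s _; simp
  | cons a t ih =>
    intro acc s h
    match s with
    | [] => simp at h
    | c :: s' =>
      simp only [List.foldl_cons, List.head?_cons, List.tail_cons, Option.bind_some]
      rw [ih _ s' (by simpa using h)]
      simp [pvDigitOf, List.take_succ_cons, List.drop_succ_cons]

theorem pvParseRow_eq (W : Int) (s : List Char) (h : (W - 0).toNat ≤ s.length) :
    pvParseRow W s = ((s.take (W - 0).toNat).map pvDigitOf, s.drop (W - 0).toNat) := by
  unfold pvParseRow
  rw [pvParseRow_fold _ _ _ (by rw [PySem.List.length_pyRange_one]; exact h)]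
  rw [PySem.List.length_pyRange_one]
  simp

-- parse_layer characterisation: l.length rows of WIDTH digits from the front.
theorem pvParseLayer_fold (W : Int) (l : List Int) :
    ∀ (acc : List (List Int)) (s : List Char), l.length * (W - 0).toNat ≤ s.length →
    l.foldl (fun (st : List (List Int) × List Char) _ =>
        let rs := pvParseRow W st.2
        (st.1 ++ [rs.1], rs.2))
      (acc, s)
      = (acc ++ (List.range l.length).map
            (fun j => ((s.drop (j * (W - 0).toNat)).take ((W - 0).toNat)).map pvDigitOf),
         s.drop (l.length * (W - 0).toNat)) := by
  induction l with
  | nil => intro acc s _; simp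
  | cons a t ih =>
    intro acc s h
    have hexp : (a :: t).length * (W - 0).toNat = t.length * (W - 0).toNat + (W - 0).toNat := by
      simp [Nat.succ_mul]
    have hW : (W - 0).toNat ≤ s.length := by omega
    simp only [List.foldl_cons]
    rw [pvParseRow_eq W s hW]
    rw [ih _ (s.drop ((W - 0).toNat)) (by simp only [List.length_drop]; omega)]
    simp only [List.length_cons]
    rw [List.range_succ_eq_map]
    simp only [List.map_cons, List.map_map, List.drop_drop, Prod.mk.injEq]
    refine ⟨?_, ?_⟩
    · simp only [List.append_assoc, List.singleton_append, Nat.zero_mul, List.drop_zero]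
      congr 2
      apply List.map_congr_left
      intro j _
      simp only [Function.comp_apply]
      congr 3
      rw [Nat.succ_mul]
      ring
    · congr 1
      rw [Nat.succ_mul]
      ring

theorem pvParseLayer_eq (H W : Int) (s : List Char)
    (h : (H - 0).toNat * (W - 0).toNat ≤ s.length) :
    pvParseLayer H W s
      = ((List.range (H - 0).toNat).map
            (fun j => ((s.drop (j * (W - 0).toNat)).take ((W - 0).toNat)).map pvDigitOf),
         s.drop ((H - 0).toNat * (W - 0).toNat)) := by
  unfold pvParseLayer
  rw [pvParseLayer_fold _ _ _ _ (by rw [PySem.List.length_pyRange_one]; exact h)]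
  rw [PySem.List.length_pyRange_one]
  simp

-- outer loop characterisation: the image is l.length layers taken from the front.
theorem pvParseImg_fold (H W : Int) (l : List Int) :
    ∀ (acc : List (List (List Int))) (s : List Char),
      l.length * ((H - 0).toNat * (W - 0).toNat) ≤ s.length →
    l.foldl (fun (st : List (List (List Int)) × List Char) _ =>
        let ls := pvParseLayer H W st.2
        (st.1 ++ [ls.1], ls.2))
      (acc, s)
      = (acc ++ (List.range l.length).map
            (fun i => (List.range (H - 0).toNat).map
              (fun j => (((s.drop (i * ((H - 0).toNat * (W - 0).toNat) + j * (W - 0).toNat)).take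
                  ((W - 0).toNat))).map pvDigitOf)),
         s.drop (l.length * ((H - 0).toNat * (W - 0).toNat))) := by
  induction l with
  | nil => intro acc s _; simp
  | cons a t ih =>
    intro acc s h
    have hexp : (a :: t).length * ((H - 0).toNat * (W - 0).toNat)
        = t.length * ((H - 0).toNat * (W - 0).toNat) + (H - 0).toNat * (W - 0).toNat := by
      simp [Nat.succ_mul]
    have hHW : (H - 0).toNat * (W - 0).toNat ≤ s.length := by omega
    simp only [List.foldl_cons]
    have hlay := pvParseLayer_eq H W s hHW
    rw [hlay]
    rw [ih _ (s.drop ((H - 0).toNat * (W - 0).toNat)) (by simp only [List.length_drop]; omega)]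
    simp only [List.length_cons]
    rw [List.range_succ_eq_map]
    simp only [List.map_cons, List.map_map, List.drop_drop, Prod.mk.injEq]
    refine ⟨?_, ?_⟩
    · simp only [List.append_assoc, List.singleton_append, Nat.zero_mul, Nat.zero_add]
      congr 2
      apply List.map_congr_left
      intro i _
      simp only [Function.comp_apply]
      apply List.map_congr_left
      intro j _
      congr 3
      rw [Nat.succ_mul]
      ring
    · congr 1
      rw [Nat.succ_mul]
      ring

-- One row of A: the WIDTH-loop over pvDigitAt at linear offsets equals a mapped
-- contiguous chunk of the character list.
theorem pvRow_eq (s : String) (a W : Int) (ha : 0 ≤ a) (hW : 0 ≤ W)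
    (hb : a + W ≤ (s.toList.length : Int)) :
    (PySem.List.pyRange 0 W 1).map (fun k => pvDigitAt s (a + k))
      = ((s.toList.drop a.toNat).take W.toNat).map pvDigitOf := by
  simp only [pvDigitAt, PySem.Str.pyGet?_eq, PySem.Chars.pyGet?_eq_listPyGet?]
  apply List.ext_getElem
  · simp only [List.length_map, PySem.List.length_pyRange_one, List.length_take,
      List.length_drop]
    omega
  · intro p h1 h2
    simp only [List.getElem_map, PySem.List.getElem_pyRange_one, List.getElem_take,
      List.getElem_drop, zero_add]
    have hlen : p < (W - 0).toNat := by simpa [PySem.List.length_pyRange_one] using h1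
    have hidx : a + (p : Int) = ((a.toNat + p : Nat) : Int) := by omega
    rw [hidx, PySem.List.pyGet?_natCast]
    have hin : a.toNat + p < s.toList.length := by omega
    simp [pvDigitOf, List.getElem?_eq_getElem hin]

-- ===== VERDICT (by name: the statement is the Claim_ definition above) =====
theorem read_image_spec : Claim_equal_read_image := by
  intro img_str HEIGHT WIDTH DEPTH _ hpre
  unfold Spec_read_image read_image read_image_alt
  obtain ⟨hlen, _⟩ := hpre
  rw [if_pos hlen, if_pos hlen]
  have hn : DEPTH * HEIGHT * WIDTH = (img_str.toList.length : Int) := by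
    rw [hlen]; simp [PySem.Str.len_eq]
  have hbound : ((DEPTH - 0).toNat) * ((HEIGHT - 0).toNat * (WIDTH - 0).toNat)
      ≤ img_str.toList.length := by
    by_cases hD : 0 < DEPTH
    · by_cases hH : 0 < HEIGHT
      · by_cases hW : 0 < WIDTH
        · have hc : (((DEPTH - 0).toNat * ((HEIGHT - 0).toNat * (WIDTH - 0).toNat) : Nat) : Int)
              = DEPTH * HEIGHT * WIDTH := by
            push_cast
            rw [Int.toNat_of_nonneg (show (0:Int) ≤ DEPTH - 0 by omega),
              Int.toNat_of_nonneg (show (0:Int) ≤ HEIGHT - 0 by omega),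
              Int.toNat_of_nonneg (show (0:Int) ≤ WIDTH - 0 by omega)]
            ring
          omega
        · have hz : (WIDTH - 0).toNat = 0 := by omega
          rw [hz]
          simp
      · have hz : (HEIGHT - 0).toNat = 0 := by omega
        rw [hz]
        simp
    · have hz : (DEPTH - 0).toNat = 0 := by omega
      rw [hz]
      simp
  have hB := pvParseImg_fold HEIGHT WIDTH (PySem.List.pyRange 0 DEPTH 1) [] img_str.toList
    (by rw [PySem.List.length_pyRange_one]; exact hbound)
  rw [hB]
  simp only [List.nil_append, PySem.List.length_pyRange_one]
  rw [PySem.List.foldl_append_singleton_eq_map, PySem.List.pyRange_one 0 DEPTH, List.map_map]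
  apply List.map_congr_left
  intro i hi
  simp only [Function.comp_apply]
  have hiD : (i : Int) < DEPTH := by
    have := List.mem_range.1 hi; omega
  have hD : 0 < DEPTH := by omega
  rw [PySem.List.foldl_append_singleton_eq_map, PySem.List.pyRange_one 0 HEIGHT, List.map_map]
  simp only [List.nil_append]
  apply List.map_congr_left
  intro j hj
  simp only [Function.comp_apply]
  have hjH : (j : Int) < HEIGHT := by
    have := List.mem_range.1 hj; omega
  have hH : 0 < HEIGHT := by omega
  have hW : 0 ≤ WIDTH := by
    by_contra hneg
    have h1 : DEPTH * HEIGHT * WIDTH < 0 :=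
      mul_neg_of_pos_of_neg (mul_pos hD hH) (by omega)
    have h2 : (0 : Int) ≤ (img_str.toList.length : Int) := by positivity
    omega
  rw [PySem.List.foldl_append_singleton_eq_map]
  simp only [List.nil_append, zero_add]
  have ha : (0:Int) ≤ (i : Int) * HEIGHT * WIDTH + (j : Int) * WIDTH := by
    have : (0:Int) ≤ (i : Int) * HEIGHT * WIDTH :=
      mul_nonneg (mul_nonneg (Int.natCast_nonneg i) (by omega)) hW
    have : (0:Int) ≤ (j : Int) * WIDTH := mul_nonneg (Int.natCast_nonneg j) hW
    omega
  have hb : (i : Int) * HEIGHT * WIDTH + (j : Int) * WIDTH + WIDTH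
      ≤ (img_str.toList.length : Int) := by
    have hHW : (0:Int) ≤ HEIGHT * WIDTH := mul_nonneg (by omega) hW
    have e1 : ((i:Int) + 1) * (HEIGHT * WIDTH) ≤ DEPTH * (HEIGHT * WIDTH) :=
      mul_le_mul_of_nonneg_right (by omega) hHW
    have e2 : ((j:Int) + 1) * WIDTH ≤ HEIGHT * WIDTH :=
      mul_le_mul_of_nonneg_right (by omega) hW
    nlinarith [e1, e2]
  rw [pvRow_eq img_str ((i : Int) * HEIGHT * WIDTH + (j : Int) * WIDTH) WIDTH ha hW hb]
  have hnat : ((i : Int) * HEIGHT * WIDTH + (j : Int) * WIDTH).toNat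
      = i * ((HEIGHT - 0).toNat * (WIDTH - 0).toNat) + j * (WIDTH - 0).toNat := by
    have hcast : ((i * ((HEIGHT - 0).toNat * (WIDTH - 0).toNat) + j * (WIDTH - 0).toNat : Nat) : Int)
        = (i : Int) * HEIGHT * WIDTH + (j : Int) * WIDTH := by
      push_cast
      rw [Int.toNat_of_nonneg (by omega : (0:Int) ≤ HEIGHT - 0),
        Int.toNat_of_nonneg (by omega : (0:Int) ≤ WIDTH - 0)]
      ring
    rw [← hcast, Int.toNat_natCast]
  rw [hnat]
  have hWnat : WIDTH.toNat = (WIDTH - 0).toNat := by omega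
  rw [hWnat]
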